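-- pv_equiv track=rewrite | github.com/cleangun/Programmers_CondingTest | 프로그래머스/2/150368. 이모티콘 할인행사/이모티콘 할인행사.py | solution
-- ===== SOURCE A (Python) =====
-- from itertools import product
--
-- def solution(u, e):
--     discount_rates = [10,20,30,40]
--     # 이모티콘 개별 할인율의 모든 조합 구하기
--     discount_cases = list(product(discount_rates, repeat=len(e)))
--
--     cases = []
--     # 조합 for문
--     for c_idx in range(len(discount_cases)):
--         comb_cnt , comb_sum = 0, 0
--         discount_case = discount_cases[c_idx]
--         # user for문
--         for u_idx in range(len(u)):
--             user_limit_discount , user_limit_price = u[u_idx][0] , u[u_idx][1]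
--             user_price = 0;
--             # discount for문
--             for d_idx in range(len(discount_case)):
--                 # 유저가 원하는 할인율일 경우
--                 if discount_case[d_idx] >= user_limit_discount:
--                     user_price += (e[d_idx] * (100 -discount_case[d_idx])) // 100
--
--             if user_price >= user_limit_price:
--                 comb_cnt += 1
--             else:
--                 comb_sum += user_price
--
--         cases.append([comb_cnt, comb_sum])
--
--     cases = sorted(cases , key = lambda x: (x[0],x[1]), reverse=True)
--
--     answer = cases[0]
--     return answer
-- ===== SOURCE B (Python) =====
-- def solution(u, e):
--     n = len(e)
--
--     def best(i, disc):
--         if i == n: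
--             cnt, total = 0, 0
--             for user in u:
--                 limit_discount, limit_price = user[0], user[1]
--                 price = 0
--                 for item_price, d in zip(e, disc):
--                     if d >= limit_discount:
--                         price += (item_price * (100 - d)) // 100
--                 if price >= limit_price:
--                     cnt += 1
--                 else:
--                     total += price
--             return (cnt, total)
--         r = best(i + 1, disc + [10])
--         for d in (20, 30, 40):
--             c = best(i + 1, disc + [d])
--             if c > r:
--                 r = c
--         return r
--
--     c, s = best(0, [])
--     return [c, s]
-- ===== Notes on version B (the rewrite author's own statement) =====
-- stated objective: alternative
-- what changed: Replaces itertools.product over all 4^n discount combinations plus collect-all-rows-then-sort-and-take-first by a backtracking recursion that assigns one rate per emoticon and keeps only a running lexicographic (count, spend) best via tuple comparison.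
import Mathlib
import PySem

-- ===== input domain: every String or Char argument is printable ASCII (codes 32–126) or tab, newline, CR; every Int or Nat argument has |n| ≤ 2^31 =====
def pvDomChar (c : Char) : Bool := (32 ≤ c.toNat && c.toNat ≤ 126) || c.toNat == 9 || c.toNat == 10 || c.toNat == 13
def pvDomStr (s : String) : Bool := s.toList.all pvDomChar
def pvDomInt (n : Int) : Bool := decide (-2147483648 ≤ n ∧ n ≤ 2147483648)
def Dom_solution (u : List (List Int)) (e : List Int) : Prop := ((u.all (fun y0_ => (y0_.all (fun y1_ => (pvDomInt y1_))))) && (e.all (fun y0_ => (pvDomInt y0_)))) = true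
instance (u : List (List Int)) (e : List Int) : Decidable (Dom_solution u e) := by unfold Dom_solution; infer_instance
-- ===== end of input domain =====

-- B replaces A's "materialise all 4^n discount cases with itertools.product, score each,
-- sort all scores and take the first" by a backtracking recursion over the emoticons that
-- keeps only a running lexicographic best; objective: alternative (no speed claim).

-- ===== PORT A =====

-- itertools.product([10,20,30,40], repeat=n), tuples as lists, CPython order (first slot slowest)
def pvProd : Nat → List (List Int)
  | 0 => [[]]
  | n + 1 => ([10, 20, 30, 40] : List Int).flatMap (fun r => (pvProd n).map (r :: ·))

-- A's innermost loop: 'for d_idx in range(len(discount_case)): …'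
def aPrice (e dc : List Int) (ld : Int) : Int :=
  (PySem.List.pyRange 0 (dc.length : Int) 1).foldl
    (fun user_price d_idx =>
      if PySem.List.pyGetD dc d_idx 0 ≥ ld then
        user_price + PySem.Int.floordiv (PySem.List.pyGetD e d_idx 0 * (100 - PySem.List.pyGetD dc d_idx 0)) 100
      else user_price) 0

-- A's user loop for one discount case (comb_cnt, comb_sum); u[u_idx][0]/[1] are in range on Pre_
def aRow (u : List (List Int)) (e dc : List Int) : Int × Int :=
  (PySem.List.pyRange 0 (u.length : Int) 1).foldl
    (fun p u_idx =>
      let user_limit_discount := PySem.List.pyGetD (PySem.List.pyGetD u u_idx []) 0 0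
      let user_limit_price := PySem.List.pyGetD (PySem.List.pyGetD u u_idx []) 1 0
      let user_price := aPrice e dc user_limit_discount
      if user_price ≥ user_limit_price then (p.1 + 1, p.2) else (p.1, p.2 + user_price)) (0, 0)

-- Python's sorted(cases, key=lambda x:(x[0],x[1]), reverse=True) is CPython's stable mergesort;
-- ported with Lean's stable List.mergeSort and the same comparator (a may precede b iff not key(a) < key(b)
-- lexicographically), because PySem's insertion-sort primitive cannot be evaluated on the 4^len(e) rows A sorts.
def aLe (a b : List Int) : Bool :=
  !(decide (PySem.List.pyGetD a 0 0 < PySem.List.pyGetD b 0 0)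
    || (PySem.List.pyGetD a 0 0 == PySem.List.pyGetD b 0 0
        && decide (PySem.List.pyGetD a 1 0 < PySem.List.pyGetD b 1 0)))

def solution (u : List (List Int)) (e : List Int) : List Int :=
  let discount_cases := pvProd e.length
  let cases := (PySem.List.pyRange 0 (discount_cases.length : Int) 1).foldl
    (fun cs c_idx =>
      let discount_case := PySem.List.pyGetD discount_cases c_idx []
      let r := aRow u e discount_case
      cs ++ [[r.1, r.2]]) []
  let sortedCases := cases.mergeSort aLe
  -- cases[0]: cases is never empty (the product of a nonempty list is nonempty), so index 0 is in range
  PySem.List.pyGetD sortedCases 0 []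

-- ===== PORT B =====

-- Python tuple comparison c > r on (cnt, sum)
def pvLexGt (c r : Int × Int) : Bool := decide (r.1 < c.1) || (c.1 == r.1 && decide (r.2 < c.2))

-- B's base case: score a full discount assignment (cnt, total)
def pvUserEval (u : List (List Int)) (e disc : List Int) : Int × Int :=
  u.foldl
    (fun (p : Int × Int) user =>
      let limit_discount := PySem.List.pyGetD user 0 0
      let limit_price := PySem.List.pyGetD user 1 0
      let price := (e.zip disc).foldl
        (fun pr q => if q.2 ≥ limit_discount then pr + PySem.Int.floordiv (q.1 * (100 - q.2)) 100 else pr) 0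
      if price ≥ limit_price then (p.1 + 1, p.2) else (p.1, p.2 + price)) (0, 0)

-- B's recursion 'best(i, disc)', counting the remaining slots
def pvBest (u : List (List Int)) (e : List Int) (disc : List Int) : Nat → Int × Int
  | 0 => pvUserEval u e disc
  | k + 1 =>
    let r := pvBest u e (disc ++ [10]) k
    ([20, 30, 40] : List Int).foldl
      (fun r d =>
        let c := pvBest u e (disc ++ [d]) k
        if pvLexGt c r then c else r) r

def solution_alt (u : List (List Int)) (e : List Int) : List Int :=
  let b := pvBest u e [] e.length
  [b.1, b.2]

-- ===== PRECONDITION & SPEC =====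
-- Pre_ excludes inputs where some user entry has fewer than two components: there the Python A
-- raises IndexError on u[u_idx][0] / u[u_idx][1] (and B raises the same way on user[0]/user[1]).
def Pre_solution (u : List (List Int)) (e : List Int) : Prop := ∀ x ∈ u, 2 ≤ x.length
instance (u : List (List Int)) (e : List Int) : Decidable (Pre_solution u e) := by unfold Pre_solution; infer_instance
def pvWitness_solution : List (List Int) × List Int := ([[40, 100], [10, 1000]], [400, 4200])

def Spec_solution (u : List (List Int)) (e : List Int) (out : List Int) : Prop := out = solution_alt u e
instance (u : List (List Int)) (e : List Int) (out : List Int) : Decidable (Spec_solution u e out) := by unfold Spec_solution; infer_instance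

-- ===== CLAIM (what is proved, stated in full; the proofs are below) =====
def Claim_equal_solution : Prop := ∀ (u : List (List Int)) (e : List Int), Dom_solution u e → Pre_solution u e → Spec_solution u e (solution u e)

-- ===== LEMMAS AND PROOFS =====

-- lexicographic ≤ on (cnt, sum) pairs
def lexLe (q p : Int × Int) : Prop := q.1 < p.1 ∨ (q.1 = p.1 ∧ q.2 ≤ p.2)

theorem lexLe_refl (p : Int × Int) : lexLe p p := by unfold lexLe; omega

theorem lexLe_trans {a b c : Int × Int} (h1 : lexLe a b) (h2 : lexLe b c) : lexLe a c := by
  unfold lexLe at *; omega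

theorem lexLe_antisymm {a b : Int × Int} (h1 : lexLe a b) (h2 : lexLe b a) : a = b := by
  unfold lexLe at *
  obtain ⟨x, y⟩ := a; obtain ⟨z, w⟩ := b
  simp at *; omega

theorem lexGt_true {c r : Int × Int} (h : pvLexGt c r = true) : lexLe r c := by
  simp [pvLexGt] at h; unfold lexLe; omega

theorem lexGt_false {c r : Int × Int} (h : pvLexGt c r = false) : lexLe c r := by
  simp [pvLexGt] at h; unfold lexLe; omega

theorem length_mem_pvProd {k : Nat} {t : List Int} (h : t ∈ pvProd k) : t.length = k := by
  induction k generalizing t with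
  | zero => simp [pvProd] at h; simp [h]
  | succ n ih =>
    simp only [pvProd, List.mem_flatMap, List.mem_map] at h
    obtain ⟨r, _, t', ht', rfl⟩ := h
    simp [ih ht']

theorem pvProd_ne_nil (k : Nat) : pvProd k ≠ [] := by
  induction k with
  | zero => simp [pvProd]
  | succ n ih =>
    intro h
    obtain ⟨w, hw⟩ := List.exists_mem_of_ne_nil _ ih
    have h10 : ((10 : Int) :: w) ∈ pvProd (n + 1) := by
      simp only [pvProd, List.mem_flatMap, List.mem_map]
      exact ⟨10, by simp, w, hw, rfl⟩
    rw [h] at h10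
    exact (List.not_mem_nil) h10

-- B's running-max fold: its result is the initial value or one of the candidates, and bounds them all
theorem foldl_best_spec (f : Int → Int × Int) (l : List Int) :
    ∀ init : Int × Int,
      (l.foldl (fun r d => let c := f d; if pvLexGt c r then c else r) init = init
        ∨ ∃ d ∈ l, l.foldl (fun r d => let c := f d; if pvLexGt c r then c else r) init = f d)
      ∧ lexLe init (l.foldl (fun r d => let c := f d; if pvLexGt c r then c else r) init)
      ∧ ∀ d ∈ l, lexLe (f d) (l.foldl (fun r d => let c := f d; if pvLexGt c r then c else r) init) := by
  induction l with
  | nil => intro init; refine ⟨Or.inl rfl, lexLe_refl _, by simp⟩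
  | cons a l ih =>
    intro init
    simp only [List.foldl_cons]
    obtain ⟨hmem, hinit, hub⟩ := ih (if pvLexGt (f a) init then f a else init)
    constructor
    · rcases hmem with h | ⟨d, hd, h⟩
      · by_cases hg : pvLexGt (f a) init = true
        · right; exact ⟨a, by simp, by simp [hg] at h; simp [h, hg]⟩
        · left; simp [hg] at h ⊢; exact h
      · right; exact ⟨d, by simp [hd], h⟩
    constructor
    · refine lexLe_trans ?_ hinit
      by_cases hg : pvLexGt (f a) init = true
      · simp [hg]; exact lexGt_true hg
      · simp [hg]; exact lexLe_refl _
    · intro d hd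
      rcases List.mem_cons.mp hd with rfl | hd
      · refine lexLe_trans ?_ hinit
        by_cases hg : pvLexGt (f d) init = true
        · simp [hg]; exact lexLe_refl _
        · simp [hg]; exact lexGt_false (by simpa using hg)
      · exact hub d hd

-- B's recursion returns the score of some assignment and bounds the scores of all assignments
theorem pvBest_spec (u : List (List Int)) (e : List Int) :
    ∀ (k : Nat) (disc : List Int),
      (∃ t ∈ pvProd k, pvBest u e disc k = pvUserEval u e (disc ++ t))
      ∧ ∀ t ∈ pvProd k, lexLe (pvUserEval u e (disc ++ t)) (pvBest u e disc k) := by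
  intro k
  induction k with
  | zero =>
    intro disc
    constructor
    · exact ⟨[], by simp [pvProd], by simp [pvBest]⟩
    · intro t ht
      simp [pvProd] at ht
      subst ht
      simp [pvBest, lexLe_refl]
  | succ n ih =>
    intro disc
    have hfold := foldl_best_spec (fun d => pvBest u e (disc ++ [d]) n) [20, 30, 40]
      (pvBest u e (disc ++ [10]) n)
    have hdef : pvBest u e disc (n + 1) =
        ([20, 30, 40] : List Int).foldl
          (fun r d => let c := pvBest u e (disc ++ [d]) n; if pvLexGt c r then c else r)
          (pvBest u e (disc ++ [10]) n) := rfl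
    obtain ⟨hmem, hinit, hub⟩ := hfold
    constructor
    · have hx : ∃ d ∈ ([10, 20, 30, 40] : List Int),
          pvBest u e disc (n + 1) = pvBest u e (disc ++ [d]) n := by
        rcases hmem with h | ⟨d, hd, h⟩
        · exact ⟨10, by simp, by rw [hdef, h]⟩
        · refine ⟨d, ?_, by rw [hdef, h]⟩
          simp at hd ⊢; rcases hd with h|h|h <;> simp [h]
      obtain ⟨d, hd, hx⟩ := hx
      obtain ⟨⟨t2, ht2, heq⟩, _⟩ := ih (disc ++ [d])
      refine ⟨d :: t2, ?_, ?_⟩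
      · simp only [pvProd, List.mem_flatMap, List.mem_map]
        exact ⟨d, hd, t2, ht2, rfl⟩
      · rw [hx, heq]; congr 1; simp
    · intro t ht
      simp only [pvProd, List.mem_flatMap, List.mem_map] at ht
      obtain ⟨d, hd, t2, ht2, rfl⟩ := ht
      obtain ⟨_, hub2⟩ := ih (disc ++ [d])
      have h1 : lexLe (pvUserEval u e (disc ++ d :: t2)) (pvBest u e (disc ++ [d]) n) := by
        have := hub2 t2 ht2; simpa using this
      rw [hdef]
      rcases List.mem_cons.mp hd with rfl | hd2
      · exact lexLe_trans h1 hinit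
      · exact lexLe_trans h1 (hub d hd2)

-- an index loop over two equally long lists is a zip fold
theorem foldl_idx_zip (f : Int → Int → Int → Int) :
    ∀ (dc e : List Int), e.length = dc.length → ∀ (init : Int),
    (List.range dc.length).foldl (fun up k => f up (dc.getD k 0) (e.getD k 0)) init
    = (e.zip dc).foldl (fun pr q => f pr q.2 q.1) init := by
  intro dc
  induction dc with
  | nil => intro e h init; simp at h; simp [h]
  | cons d ds ih =>
    intro e h init
    cases e with
    | nil => simp at h
    | cons x xs =>
      simp only [List.length_cons, List.range_succ_eq_map, List.foldl_cons, List.foldl_map,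
        List.getD_cons_zero, List.zip_cons_cons]
      have h2 : xs.length = ds.length := by simpa using h
      have := ih xs h2 (f init d x)
      simpa using this

-- A's inner index loop computes the same price as B's zip loop
theorem aPrice_eq (e dc : List Int) (h : dc.length = e.length) (ld : Int) :
    aPrice e dc ld = (e.zip dc).foldl
      (fun pr q => if q.2 ≥ ld then pr + PySem.Int.floordiv (q.1 * (100 - q.2)) 100 else pr) 0 := by
  unfold aPrice
  rw [PySem.List.pyRange_one]
  simp only [Int.sub_zero, Int.toNat_natCast, List.foldl_map, zero_add, PySem.List.pyGetD_natCast]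
  exact foldl_idx_zip (fun up a b => if a ≥ ld then up + PySem.Int.floordiv (b * (100 - a)) 100 else up) dc e h.symm 0

-- A's user loop equals B's user fold
theorem aRow_eq (u : List (List Int)) (e dc : List Int) (h : dc.length = e.length) :
    aRow u e dc = pvUserEval u e dc := by
  unfold aRow pvUserEval
  rw [PySem.List.foldl_pyRange_zero_pyGetD' u []
    (fun (p : Int × Int) user =>
      if aPrice e dc (PySem.List.pyGetD user 0 0) ≥ PySem.List.pyGetD user 1 0 then (p.1 + 1, p.2)
      else (p.1, p.2 + aPrice e dc (PySem.List.pyGetD user 0 0))) (0, 0)]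
  refine PySem.List.foldl_congr_mem u _ _ (0, 0) ?_
  intro acc x hx
  simp only [aPrice_eq e dc h]

-- comparator facts for the stable descending sort
theorem aLe_trans (a b c : List Int) (h1 : aLe a b = true) (h2 : aLe b c = true) : aLe a c = true := by
  simp [aLe] at *; omega

theorem aLe_total (a b : List Int) : (aLe a b || aLe b a) = true := by
  simp [aLe]; omega

theorem aLe_le {m y : List Int} (h : aLe m y = true) :
    lexLe (PySem.List.pyGetD y 0 0, PySem.List.pyGetD y 1 0)
      (PySem.List.pyGetD m 0 0, PySem.List.pyGetD m 1 0) := by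
  simp [aLe] at h; unfold lexLe; simp; omega

-- the head of the descending stable sort is a key-maximal element of the input
theorem mergeSort_head {xs : List (List Int)} {m : List Int} {t : List (List Int)}
    (h : xs.mergeSort aLe = m :: t) :
    m ∈ xs ∧ ∀ y ∈ xs, lexLe (PySem.List.pyGetD y 0 0, PySem.List.pyGetD y 1 0)
      (PySem.List.pyGetD m 0 0, PySem.List.pyGetD m 1 0) := by
  have hperm := List.mergeSort_perm xs aLe
  rw [h] at hperm
  constructor
  · exact hperm.mem_iff.mp (by simp)
  · intro y hy
    have hpw : (m :: t).Pairwise (fun a b => aLe a b = true) := by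
      rw [← h]
      exact List.pairwise_mergeSort aLe_trans aLe_total xs
    have hy2 : y ∈ m :: t := hperm.symm.mem_iff.mp hy
    rcases List.mem_cons.mp hy2 with rfl | hy2
    · exact lexLe_refl _
    · exact aLe_le ((List.pairwise_cons.mp hpw).1 y hy2)

theorem main_eq (u : List (List Int)) (e : List Int) : solution u e = solution_alt u e := by
  simp only [solution, solution_alt]
  have hcases : (PySem.List.pyRange 0 ((pvProd e.length).length : Int) 1).foldl
      (fun cs c_idx =>
        let discount_case := PySem.List.pyGetD (pvProd e.length) c_idx []
        let r := aRow u e discount_case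
        cs ++ [[r.1, r.2]]) []
      = (pvProd e.length).map
        (fun dc => [(pvUserEval u e dc).1, (pvUserEval u e dc).2]) := by
    rw [PySem.List.foldl_pyRange_zero_pyGetD' (pvProd e.length) []
      (fun cs dc => cs ++ [[(aRow u e dc).1, (aRow u e dc).2]]) []]
    rw [PySem.List.foldl_append_singleton_eq_map
      (fun dc => [(aRow u e dc).1, (aRow u e dc).2]) (pvProd e.length) []]
    simp only [List.nil_append]
    refine List.map_congr_left ?_
    intro dc hdc
    rw [aRow_eq u e dc (length_mem_pvProd hdc)]
  rw [hcases]
  set cases := (pvProd e.length).map (fun dc => [(pvUserEval u e dc).1, (pvUserEval u e dc).2]) with hc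
  have hne : cases ≠ [] := by
    simp [hc, List.map_eq_nil_iff]
    exact pvProd_ne_nil e.length
  rcases hS : cases.mergeSort aLe with _ | ⟨m, t⟩
  · exfalso
    have := List.mergeSort_perm cases aLe
    rw [hS] at this
    exact hne this.symm.eq_nil
  · obtain ⟨hm, hub⟩ := mergeSort_head hS
    obtain ⟨dc0, hdc0, hm0⟩ := List.mem_map.mp hm
    obtain ⟨⟨t0, ht0, hb0⟩, hbub⟩ := pvBest_spec u e e.length []
    simp only [List.nil_append] at hb0 hbub
    set p := pvUserEval u e dc0 with hp
    set b := pvBest u e [] e.length with hb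
    have hble : lexLe b p := by
      have hy : [b.1, b.2] ∈ cases := by
        rw [hc]
        exact List.mem_map.mpr ⟨t0, ht0, by rw [← hb0]⟩
      have := hub _ hy
      rw [← hm0] at this
      simpa using this
    have hpleb : lexLe p b := hbub dc0 hdc0
    have hpb : p = b := lexLe_antisymm hpleb hble
    rw [← hm0, hpb, PySem.List.pyGetD_ofNat']
    simp

-- ===== VERDICT (by name: the statement is the Claim_ definition above) =====
theorem solution_spec : Claim_equal_solution := by
  intro u e _ _
  unfold Spec_solution
  exact main_eq u e
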